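-- pv_equiv track=rewrite | github.com/Ray0716/usaco-solutions | jan-feb-2023practice/simulation/teamTicTacToe/tttt.py | checkSingleCowVictories
-- ===== SOURCE A (Python) =====
-- def checkSingleCowVictories(board):
--     count = 0
--     victoryCows = []
--     for x in range(3):
--         if all(i == board[x][0] for i in board[x]): # check horiz
--             count += 1
--             victoryCows.append(board[x][0])
--         if all(i == board[0][x] for i in [board[0][x], board[1][x], board[2][x]]): # check vertic row
--             count += 1
--             victoryCows.append(board[0][x])
--     if all(i == board[0][0] for i in [board[0][0], board[1][1], board[2][2]]): # down diagonal
--         count += 1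
--         victoryCows.append(board[0][0])
--     if all(i == board[0][2] for i in [board[0][2], board[1][1], board[2][0]]): # up diagonal
--         count += 1
--         victoryCows.append(board[0][2])
--
--     victoryCows = list(set(victoryCows))
--
--     return len(victoryCows) # number of single victories possible
-- ===== SOURCE B (Python) =====
-- def checkSingleCowVictories(board):
--     # symbol-centric: count distinct cell values for which some line is entirely that value
--     def wins(v):
--         if any(all(c == v for c in board[i]) for i in range(3)):
--             return True
--         if any(board[0][j] == board[1][j] == board[2][j] == v for j in range(3)):
--             return True
--         return (board[0][0] == board[1][1] == board[2][2] == v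
--                 or board[0][2] == board[1][1] == board[2][0] == v)
--     cells = {board[i][j] for i in range(3) for j in range(3)}
--     return sum(1 for v in cells if wins(v))
-- ===== Notes on version B (the rewrite author's own statement) =====
-- stated objective: alternative
-- what changed: Inverts the iteration: instead of scanning the 8 lines, collecting winning values into a list and deduplicating it at the end, B loops over the distinct symbols of the 3x3 region and counts those for which some line consists entirely of that symbol, so no winner list or final dedup exists.
import Mathlib
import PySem

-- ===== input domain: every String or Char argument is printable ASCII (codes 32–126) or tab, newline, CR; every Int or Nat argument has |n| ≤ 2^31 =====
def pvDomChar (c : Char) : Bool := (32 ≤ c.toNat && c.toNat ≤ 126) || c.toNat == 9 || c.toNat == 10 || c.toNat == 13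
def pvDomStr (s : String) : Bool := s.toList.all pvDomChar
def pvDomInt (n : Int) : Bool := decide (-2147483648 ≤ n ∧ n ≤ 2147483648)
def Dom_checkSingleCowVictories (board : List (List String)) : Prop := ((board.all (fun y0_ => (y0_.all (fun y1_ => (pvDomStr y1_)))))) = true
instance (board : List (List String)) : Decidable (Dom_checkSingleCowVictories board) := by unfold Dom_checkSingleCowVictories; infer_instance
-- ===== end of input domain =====

-- B inverts A's iteration: instead of scanning the 8 lines into a winner list and deduplicating
-- it at the end, B loops over the distinct symbols of the 3x3 region and counts those for which
-- some line is entirely that symbol (alternative decomposition, same cost).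

-- ===== PORT A =====
-- board[x] / board[x][y] with defaults; exact under Pre_ (indices in range)
def pvRow (board : List (List String)) (x : Int) : List String :=
  PySem.List.pyGetD board x []
def pvCell (board : List (List String)) (x y : Int) : String :=
  PySem.List.pyGetD (PySem.List.pyGetD board x []) y ""

def pvStepA (board : List (List String)) (st : Int × List String) (x : Int) : Int × List String :=
  let st := if (pvRow board x).all (fun i => i == pvCell board x 0) then
      (st.1 + 1, st.2 ++ [pvCell board x 0]) else st
  let st := if ([pvCell board 0 x, pvCell board 1 x, pvCell board 2 x]).all
      (fun i => i == pvCell board 0 x) then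
      (st.1 + 1, st.2 ++ [pvCell board 0 x]) else st
  st

def checkSingleCowVictories (board : List (List String)) : Int :=
  let st := (PySem.List.pyRange 0 3 1).foldl (pvStepA board) ((0 : Int), ([] : List String))
  let st := if ([pvCell board 0 0, pvCell board 1 1, pvCell board 2 2]).all
      (fun i => i == pvCell board 0 0) then
      (st.1 + 1, st.2 ++ [pvCell board 0 0]) else st
  let st := if ([pvCell board 0 2, pvCell board 1 1, pvCell board 2 0]).all
      (fun i => i == pvCell board 0 2) then
      (st.1 + 1, st.2 ++ [pvCell board 0 2]) else st
  PySem.Set.len (PySem.Set.ofList st.2)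

-- ===== PORT B =====
-- Source B's wins(v): the early-return chain as an or-chain; cells = the distinct 3x3 values
def pvWins (board : List (List String)) (v : String) : Bool :=
  ((PySem.List.pyRange 0 3 1).any (fun i => (pvRow board i).all (fun c => c == v)))
  || ((PySem.List.pyRange 0 3 1).any (fun j =>
        pvCell board 0 j == pvCell board 1 j && (pvCell board 1 j == pvCell board 2 j
          && pvCell board 2 j == v)))
  || ((pvCell board 0 0 == pvCell board 1 1 && (pvCell board 1 1 == pvCell board 2 2
        && pvCell board 2 2 == v))
      || (pvCell board 0 2 == pvCell board 1 1 && (pvCell board 1 1 == pvCell board 2 0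
        && pvCell board 2 0 == v)))

def checkSingleCowVictories_alt (board : List (List String)) : Int :=
  let cells := PySem.Set.ofList ((PySem.List.pyRange 0 3 1).flatMap (fun i =>
    (PySem.List.pyRange 0 3 1).map (fun j => pvCell board i j)))
  cells.foldl (fun (n : Int) v => if pvWins board v then n + 1 else n) 0

-- ===== PRECONDITION & SPEC =====
-- A raises IndexError unless the board has at least 3 rows and each of the first three rows
-- has at least 3 cells; Pre_ admits exactly the inputs on which A returns.
def Pre_checkSingleCowVictories (board : List (List String)) : Prop :=
  3 ≤ board.length ∧ ((board.take 3).all (fun r => 3 ≤ r.length)) = true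
instance (board : List (List String)) : Decidable (Pre_checkSingleCowVictories board) := by
  unfold Pre_checkSingleCowVictories; infer_instance
def pvWitness_checkSingleCowVictories : List (List String) :=
  [["a", "a", "a"], ["b", "c", "d"], ["e", "f", "g"]]

def Spec_checkSingleCowVictories (board : List (List String)) (out : Int) : Prop :=
  out = checkSingleCowVictories_alt board
instance (board : List (List String)) (out : Int) :
    Decidable (Spec_checkSingleCowVictories board out) := by
  unfold Spec_checkSingleCowVictories; infer_instance

-- ===== CLAIM =====
def Claim_equal_checkSingleCowVictories : Prop :=
  ∀ (board : List (List String)), Dom_checkSingleCowVictories board →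
    Pre_checkSingleCowVictories board →
    Spec_checkSingleCowVictories board (checkSingleCowVictories board)

-- ===== LEMMAS AND PROOFS =====
theorem pv_foldl_count (p : String → Bool) (l : List String) (n : Int) :
    l.foldl (fun (n : Int) v => if p v then n + 1 else n) n
      = n + ((l.countP p : Nat) : Int) := by
  induction l generalizing n with
  | nil => simp
  | cons a l ih => by_cases h : p a = true <;> simp [h, ih] <;> ring

theorem pv_length_eq_of_nodup (l1 l2 : List String) (h1 : l1.Nodup) (h2 : l2.Nodup)
    (h : ∀ a, a ∈ l1 ↔ a ∈ l2) : l1.length = l2.length :=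
  ((List.perm_ext_iff_of_nodup h1 h2).mpr h).length_eq

theorem pv_snd_step (c : Prop) [Decidable c] (st : Int × List String) (v : String) :
    (if c then (st.1 + 1, st.2 ++ [v]) else st).2 = st.2 ++ (if c then [v] else []) := by
  split <;> simp

theorem pv_stepA_snd (board : List (List String)) (st : Int × List String) (x : Int) :
    (pvStepA board st x).2
      = st.2 ++ (if (pvRow board x).all (fun i => i == pvCell board x 0) then
                   [pvCell board x 0] else [])
             ++ (if ([pvCell board 0 x, pvCell board 1 x, pvCell board 2 x]).all
                   (fun i => i == pvCell board 0 x) then [pvCell board 0 x] else []) := by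
  unfold pvStepA; split_ifs <;> simp

theorem pv_mem_ite_single (a v : String) (c : Prop) [Decidable c] :
    (a ∈ (if c then [v] else ([] : List String))) ↔ (c ∧ a = v) := by
  split <;> simp_all

theorem pv_range3 : PySem.List.pyRange 0 3 1 = [0, 1, 2] := by decide

theorem pvRowB0 (r0 r1 r2 : List String) (rest : List (List String)) :
    pvRow (r0::r1::r2::rest) 0 = r0 := by simp [pvRow, pysem]
theorem pvRowB1 (r0 r1 r2 : List String) (rest : List (List String)) :
    pvRow (r0::r1::r2::rest) 1 = r1 := by simp [pvRow, pysem]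
theorem pvRowB2 (r0 r1 r2 : List String) (rest : List (List String)) :
    pvRow (r0::r1::r2::rest) 2 = r2 := by simp [pvRow, pysem]
theorem pvCellB0 (r0 r1 r2 : List String) (rest : List (List String)) (j : Int) :
    pvCell (r0::r1::r2::rest) 0 j = PySem.List.pyGetD r0 j "" := by simp [pvCell, pysem]
theorem pvCellB1 (r0 r1 r2 : List String) (rest : List (List String)) (j : Int) :
    pvCell (r0::r1::r2::rest) 1 j = PySem.List.pyGetD r1 j "" := by simp [pvCell, pysem]
theorem pvCellB2 (r0 r1 r2 : List String) (rest : List (List String)) (j : Int) :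
    pvCell (r0::r1::r2::rest) 2 j = PySem.List.pyGetD r2 j "" := by simp [pvCell, pysem]

theorem pv_line (l : List String) (hl : l ≠ []) (a : String) :
    ((l.all (fun c => c == PySem.List.pyGetD l 0 "") = true) ∧ a = PySem.List.pyGetD l 0 "")
      ↔ l.all (fun c => c == a) = true := by
  obtain ⟨x, t, rfl⟩ := List.exists_cons_of_ne_nil hl
  simp only [PySem.List.pyGetD_zero_cons, List.all_cons, Bool.and_eq_true, beq_iff_eq,
    List.all_eq_true, beq_self_eq_true, true_and]
  constructor
  · rintro ⟨h, rfl⟩; exact ⟨rfl, h⟩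
  · rintro ⟨rfl, h⟩; exact ⟨h, rfl⟩

theorem pv_line3 (x y z a : String) :
    ((y = x ∧ z = x) ∧ a = x) ↔ (x = y ∧ (y = z ∧ z = a)) := by
  constructor
  · rintro ⟨⟨rfl, rfl⟩, rfl⟩; exact ⟨rfl, rfl, rfl⟩
  · rintro ⟨rfl, rfl, rfl⟩; exact ⟨⟨rfl, rfl⟩, rfl⟩

-- ===== VERDICT =====
set_option maxHeartbeats 1000000 in
theorem checkSingleCowVictories_spec : Claim_equal_checkSingleCowVictories := by
  intro board _ hpre
  unfold Spec_checkSingleCowVictories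
  obtain ⟨hlen, hrows⟩ := hpre
  obtain ⟨r0, r1, r2, rest, rfl⟩ :
      ∃ r0 r1 r2 rest, board = r0 :: r1 :: r2 :: rest := by
    match board, hlen with
    | r0 :: r1 :: r2 :: rest, _ => exact ⟨r0, r1, r2, rest, rfl⟩
  simp only [List.take, List.all_cons, List.all_nil, Bool.and_true, Bool.and_eq_true,
    decide_eq_true_eq] at hrows
  obtain ⟨h0, h1, h2⟩ := hrows
  have hn0 : r0 ≠ [] := by intro h; subst h; simp at h0
  have hn1 : r1 ≠ [] := by intro h; subst h; simp at h1
  have hn2 : r2 ≠ [] := by intro h; subst h; simp at h2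
  unfold checkSingleCowVictories checkSingleCowVictories_alt
  rw [pv_range3]
  simp only [List.foldl, List.flatMap_cons, List.flatMap_nil, List.map_cons, List.map_nil,
    List.append_nil]
  rw [pv_snd_step, pv_snd_step]
  simp only [pv_stepA_snd, List.nil_append]
  rw [pv_foldl_count, List.countP_eq_length_filter, zero_add]
  simp only [PySem.Set.len]
  rw [pv_length_eq_of_nodup _ _ (PySem.Set.nodup_ofList _) ((PySem.Set.nodup_ofList _).filter _)]
  intro a
  simp only [PySem.Set.mem_ofList, List.mem_filter,
    List.mem_append, pv_mem_ite_single,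
    pvRowB0, pvRowB1, pvRowB2, pvCellB0, pvCellB1, pvCellB2]
  simp only [pvWins, pv_range3, List.any_cons, List.any_nil,
    pvRowB0, pvRowB1, pvRowB2, pvCellB0, pvCellB1, pvCellB2]
  simp only [List.all_cons, List.all_nil, List.mem_cons, List.not_mem_nil,
    Bool.and_true, Bool.or_false, beq_self_eq_true, Bool.true_and,
    Bool.and_eq_true, Bool.or_eq_true, beq_iff_eq, or_false]
  rw [pv_line r0 hn0 a, pv_line r1 hn1 a, pv_line r2 hn2 a]
  simp only [pv_line3]
  have hx : ∀ (r : List String), 3 ≤ r.length → (r.all fun c => c == a) = true →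
      PySem.List.pyGetD r 0 "" = a := by
    intro r hr hall
    have hm : PySem.List.pyGetD r 0 "" ∈ r :=
      PySem.List.pyGetD_mem r "" (by simp [PySem.Raise.InRange]; omega)
    simpa using List.all_eq_true.mp hall _ hm
  constructor
  · intro h
    rcases h with ((((((h | h) | h) | h) | h) | h) | h) | h
    · exact ⟨Or.inl (Or.inl (hx r0 h0 h).symm), Or.inl (Or.inl (Or.inl h))⟩
    · exact ⟨Or.inr (Or.inr (Or.inl h.2.2.symm)), Or.inl (Or.inr (Or.inl h))⟩
    · exact ⟨Or.inr (Or.inl (Or.inl (hx r1 h1 h).symm)), Or.inl (Or.inl (Or.inr (Or.inl h)))⟩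
    · exact ⟨Or.inr (Or.inr (Or.inr (Or.inl h.2.2.symm))), Or.inl (Or.inr (Or.inr (Or.inl h)))⟩
    · exact ⟨Or.inr (Or.inr (Or.inl (hx r2 h2 h).symm)), Or.inl (Or.inl (Or.inr (Or.inr h)))⟩
    · exact ⟨Or.inr (Or.inr (Or.inr (Or.inr h.2.2.symm))), Or.inl (Or.inr (Or.inr (Or.inr h)))⟩
    · exact ⟨Or.inr (Or.inr (Or.inr (Or.inr h.2.2.symm))), Or.inr (Or.inl h)⟩
    · exact ⟨Or.inr (Or.inr (Or.inl h.2.2.symm)), Or.inr (Or.inr h)⟩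
  · rintro ⟨-, h⟩
    rcases h with ((h | h | h) | h | h | h) | h | h
    · exact Or.inl (Or.inl (Or.inl (Or.inl (Or.inl (Or.inl (Or.inl h))))))
    · exact Or.inl (Or.inl (Or.inl (Or.inl (Or.inl (Or.inr h)))))
    · exact Or.inl (Or.inl (Or.inl (Or.inr h)))
    · exact Or.inl (Or.inl (Or.inl (Or.inl (Or.inl (Or.inl (Or.inr h))))))
    · exact Or.inl (Or.inl (Or.inl (Or.inl (Or.inr h))))
    · exact Or.inl (Or.inl (Or.inr h))
    · exact Or.inl (Or.inr h)
    · exact Or.inr h
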